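-- pv_equiv track=rewrite | github.com/YashasAB/MyCode | AI_ML_NLP/AI/yab2_mp4/utils.py | get_word_tag_statistics
-- ===== SOURCE A (Python) =====
-- import collections
--
-- def get_word_tag_statistics(data_set):
--     # get set of all seen words and set of words with multitags
--     word_tags = collections.defaultdict(lambda: set())
--     word_set = set()
--     for sentence in data_set:
--         for word, tag in sentence:
--             word_tags[word].add(tag)
--             word_set.add(word)
--     return word_set, set(map(lambda elem: elem[0], filter(lambda elem: len(elem[1]) > 1, word_tags.items())))
-- ===== SOURCE B (Python) =====
-- def get_word_tag_statistics(data_set):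
--     # get set of all seen words and set of words with multitags
--     # staged pipeline: flatten, dedupe (word, tag) pairs, then find multi-tag
--     # words by counting distinct pairs per word -- no dict of tag sets
--     pairs = []
--     for sentence in data_set:
--         pairs.extend(sentence)
--     distinct_pairs = list(dict.fromkeys(pairs))
--     words = list(dict.fromkeys(w for w, _ in pairs))
--     multi = {w for w in words if sum(1 for p in distinct_pairs if p[0] == w) > 1}
--     return set(words), multi
-- ===== Notes on version B (the rewrite author's own statement) =====
-- stated objective: alternative
-- what changed: Instead of A's single nested pass building a dict of per-word tag sets and then filtering for sets of size > 1, B is a staged pipeline with no dict at all: flatten the sentences, dedupe the (word, tag) pairs and the words, and detect multi-tag words by counting the distinct pairs that share each word.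
import Mathlib
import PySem

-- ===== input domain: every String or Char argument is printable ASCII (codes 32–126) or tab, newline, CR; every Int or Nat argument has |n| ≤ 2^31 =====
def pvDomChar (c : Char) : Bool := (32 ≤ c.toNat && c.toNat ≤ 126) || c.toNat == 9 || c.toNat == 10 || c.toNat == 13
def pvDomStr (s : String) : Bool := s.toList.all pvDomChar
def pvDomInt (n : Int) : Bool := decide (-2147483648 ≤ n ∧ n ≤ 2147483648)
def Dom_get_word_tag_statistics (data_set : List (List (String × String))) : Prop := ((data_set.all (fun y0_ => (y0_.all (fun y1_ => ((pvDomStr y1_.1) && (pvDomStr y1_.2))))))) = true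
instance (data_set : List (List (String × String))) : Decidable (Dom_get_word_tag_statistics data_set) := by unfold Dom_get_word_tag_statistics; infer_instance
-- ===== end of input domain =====

-- B replaces A's incremental dict of per-word tag sets by a staged pipeline:
-- flatten, dedupe the (word, tag) pairs, then detect multi-tag words by counting
-- distinct pairs sharing a word (alternative decomposition, no dict of tag sets).

-- ===== PORT A =====
def get_word_tag_statistics (data_set : List (List (String × String))) : List String × List String :=
  -- word_tags = defaultdict(set); word_set = set(); nested for-loops
  let st := data_set.foldl (fun st sentence => sentence.foldl
      (fun st wt => (st.1.modify wt.1 PySem.Set.empty (fun s => PySem.Set.add s wt.2),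
                     PySem.Set.add st.2 wt.1)) st)
    ((PySem.Dict.empty : PySem.Dict String (PySem.Set String)), (PySem.Set.empty : PySem.Set String))
  (st.2, PySem.Set.ofList ((st.1.items.filter (fun e => PySem.Set.len e.2 > 1)).map (fun e => e.1)))

-- ===== PORT B =====
def get_word_tag_statistics_alt (data_set : List (List (String × String))) : List String × List String :=
  -- pairs = []; for sentence in data_set: pairs.extend(sentence)
  let pairs := data_set.foldl (fun acc sentence => acc ++ sentence) []
  -- distinct_pairs = list(dict.fromkeys(pairs))
  let distinct_pairs := PySem.List.dedup pairs
  -- words = list(dict.fromkeys(w for w, _ in pairs))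
  let words := PySem.List.dedup (pairs.map (fun p => p.1))
  -- multi = {w for w in words if sum(1 for p in distinct_pairs if p[0] == w) > 1}
  let multi := PySem.Set.ofList (words.filter (fun w =>
    ((distinct_pairs.filter (fun p => p.1 == w)).map (fun _ => (1 : Int))).sum > 1))
  (PySem.Set.ofList words, multi)

-- ===== PRECONDITION & SPEC =====
def Spec_get_word_tag_statistics (data_set : List (List (String × String))) (out : List String × List String) : Prop := out = get_word_tag_statistics_alt data_set
instance (data_set : List (List (String × String))) (out : List String × List String) : Decidable (Spec_get_word_tag_statistics data_set out) := by unfold Spec_get_word_tag_statistics; infer_instance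

-- ===== CLAIM (what is proved, stated in full; the proofs are below) =====
def Claim_equal_get_word_tag_statistics : Prop := ∀ (data_set : List (List (String × String))), Dom_get_word_tag_statistics data_set → Spec_get_word_tag_statistics data_set (get_word_tag_statistics data_set)

-- ===== LEMMAS AND PROOFS =====

-- the value A's dict holds at w after folding l: the distinct tags of w, in order
lemma pvGetD_fold (l : List (String × String)) (d : PySem.Dict String (PySem.Set String)) (w : String) :
    (l.foldl (fun d p => d.modify p.1 PySem.Set.empty (fun s => PySem.Set.add s p.2)) d).getD w PySem.Set.empty
      = PySem.Set.update (d.getD w PySem.Set.empty) ((l.filter (fun p => p.1 == w)).map (fun p => p.2)) := by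
  induction l generalizing d with
  | nil => simp [PySem.Set.update]
  | cons p l ih =>
    simp only [List.foldl_cons, List.filter_cons]
    rw [ih]
    by_cases h : p.1 = w
    · simp only [h, beq_self_eq_true, if_pos, List.map_cons, PySem.Set.update_cons]
      rw [PySem.Dict.getD_modify]
      simp
    · have hb : (p.1 == w) = false := by simp [h]
      simp only [hb, Bool.false_eq_true, if_neg, not_false_iff]
      rw [PySem.Dict.getD_modify, if_neg (show ¬ w = p.1 from fun he => h he.symm)]

-- first-occurrence dedup commutes with filter
lemma pvOfList_filter {α : Type} [BEq α] [LawfulBEq α] (l : List α) (p : α → Bool) :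
    PySem.Set.ofList (l.filter p) = (PySem.Set.ofList l).filter p := by
  induction l using List.reverseRecOn with
  | nil => rfl
  | append_singleton l x ih =>
    rw [List.filter_append, PySem.Set.ofList_append_singleton]
    cases hp : p x with
    | true =>
      simp only [List.filter_cons, hp, if_pos, List.filter_nil]
      rw [PySem.Set.ofList_append_singleton, ih, PySem.Set.add_eq_ite, PySem.Set.add_eq_ite]
      by_cases hm : x ∈ PySem.Set.ofList l
      · have : x ∈ (PySem.Set.ofList l).filter p := List.mem_filter.mpr ⟨hm, hp⟩
        simp [hm, this]
      · have : x ∉ (PySem.Set.ofList l).filter p := fun hc => hm (List.mem_filter.mp hc).1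
        simp [hm, this, List.filter_append, hp]
    | false =>
      simp only [List.filter_cons, hp, Bool.false_eq_true, if_neg, not_false_iff, List.filter_nil,
        List.append_nil]
      rw [ih, PySem.Set.add_eq_ite]
      by_cases hm : x ∈ PySem.Set.ofList l
      · simp [hm]
      · simp [hm, List.filter_append, hp]

-- on a list of pairs all sharing the first component, dedup commutes with taking seconds
lemma pvOfList_map_snd (l : List (String × String)) (w : String) (h : ∀ q ∈ l, q.1 = w) :
    PySem.Set.ofList (l.map (fun p => p.2)) = (PySem.Set.ofList l).map (fun p => p.2) := by
  induction l using List.reverseRecOn with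
  | nil => rfl
  | append_singleton l x ih =>
    have hl : ∀ q ∈ l, q.1 = w := fun q hq => h q (List.mem_append_left _ hq)
    have hx : x.1 = w := h x (List.mem_append_right _ (List.mem_singleton.mpr rfl))
    rw [List.map_append, List.map_singleton, PySem.Set.ofList_append_singleton,
      PySem.Set.ofList_append_singleton, ih hl, PySem.Set.add_eq_ite, PySem.Set.add_eq_ite]
    by_cases hm : x ∈ PySem.Set.ofList l
    · have : x.2 ∈ (PySem.Set.ofList l).map (fun p => p.2) :=
        List.mem_map.mpr ⟨x, hm, rfl⟩
      simp [hm, this]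
    · have : x.2 ∉ (PySem.Set.ofList l).map (fun p => p.2) := by
        intro hc
        obtain ⟨q, hq, hqe⟩ := List.mem_map.mp hc
        have hq' : q ∈ l := (PySem.Set.mem_ofList _ _).mp hq
        have : q = x := Prod.ext ((hl q hq').trans hx.symm) hqe
        exact hm (this ▸ hq)
      simp [hm, this]

-- the distinct tags of w and the distinct pairs with first component w are equinumerous
lemma pvLen_tags (pairs : List (String × String)) (w : String) :
    (PySem.Set.ofList ((pairs.filter (fun p => p.1 == w)).map (fun p => p.2))).length
      = ((PySem.List.dedup pairs).filter (fun p => p.1 == w)).length := by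
  have hfst : ∀ q ∈ pairs.filter (fun p => p.1 == w), q.1 = w := by
    intro q hq
    exact eq_of_beq (List.mem_filter.mp hq).2
  rw [pvOfList_map_snd _ w hfst, List.length_map, PySem.List.dedup_eq_ofList,
    ← pvOfList_filter]

-- ===== VERDICT (by name: the statement is the Claim_ definition above) =====
theorem get_word_tag_statistics_spec : Claim_equal_get_word_tag_statistics := by
  intro ds _
  unfold Spec_get_word_tag_statistics get_word_tag_statistics get_word_tag_statistics_alt
  dsimp only
  -- both sides range over the flattened pair list
  rw [← List.foldl_flatten, PySem.List.foldl_append_eq_flatten, List.nil_append,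
    PySem.List.foldl_prod_mk
      (f := fun (d : PySem.Dict String (PySem.Set String)) (wt : String × String) =>
        d.modify wt.1 PySem.Set.empty (fun s => PySem.Set.add s wt.2))
      (g := fun (ws : PySem.Set String) (wt : String × String) => PySem.Set.add ws wt.1)]
  set pairs := ds.flatten with hpairs
  set D := pairs.foldl
      (fun d p => d.modify p.1 PySem.Set.empty (fun s => PySem.Set.add s p.2))
      (PySem.Dict.empty : PySem.Dict String (PySem.Set String)) with hD
  -- A's word_set is the ordered dedup of the words
  have hws : pairs.foldl (fun s p => PySem.Set.add s p.1) (PySem.Set.empty : PySem.Set String)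
      = PySem.Set.ofList (pairs.map (fun p => p.1)) := by
    rw [← PySem.Set.update_map_eq_foldl_add, PySem.Set.update_empty]
  -- A's dict: keys, their uniqueness, and each stored tag set
  have hkeys : D.keys = PySem.Set.ofList (pairs.map (fun p => p.1)) := by
    rw [hD, PySem.Dict.keys_foldl_modify_key pairs (fun p => p.1) PySem.Set.empty
      (fun _ p => fun s => PySem.Set.add s p.2), PySem.Dict.keys_empty,
      PySem.Set.update_nil_left]
  have hnd : D.keys.Nodup := by
    rw [hkeys]; exact PySem.Set.nodup_ofList _
  have hget : ∀ w, D.getD w PySem.Set.empty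
      = PySem.Set.ofList ((pairs.filter (fun p => p.1 == w)).map (fun p => p.2)) := by
    intro w
    rw [hD, pvGetD_fold, PySem.Dict.getD_empty, PySem.Set.update_empty]
  refine Prod.ext ?_ ?_
  · show pairs.foldl (fun s p => PySem.Set.add s p.1) PySem.Set.empty
        = PySem.Set.ofList (PySem.List.dedup (pairs.map (fun p => p.1)))
    rw [hws, PySem.List.dedup_eq_ofList, PySem.Set.ofList_ofList]
  · -- rewrite A's items via its keys
    show PySem.Set.ofList ((D.items.filter (fun e => decide (PySem.Set.len e.2 > 1))).map (fun e => e.1)) = _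
    rw [PySem.Dict.items_eq_map_keys D hnd PySem.Set.empty, List.filter_map, List.map_map,
      List.map_id'' (f := (fun (e : String × PySem.Set String) => e.1) ∘
        (fun k => (k, D.getD k PySem.Set.empty))) (fun _ => rfl),
      hkeys, PySem.List.dedup_eq_ofList, PySem.List.dedup_eq_ofList]
    congr 1
    apply List.filter_congr
    intro w _
    have h1 : PySem.Set.len (D.getD w PySem.Set.empty)
        = (((PySem.Set.ofList pairs).filter (fun p => p.1 == w)).length : Int) := by
      rw [hget w]
      show ((PySem.Set.ofList ((pairs.filter (fun p => p.1 == w)).map (fun p => p.2))).length : Int) = _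
      rw [pvLen_tags, PySem.List.dedup_eq_ofList]
    have h2 : (((PySem.Set.ofList pairs).filter (fun p => p.1 == w)).map
        (fun _ => (1 : Int))).sum
        = (((PySem.Set.ofList pairs).filter (fun p => p.1 == w)).length : Int) := by
      simp [List.map_const']
    simp only [Function.comp]
    rw [h1, h2]
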